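-- pv_equiv track=rewrite | github.com/rehakovaa/rocnikovy_projekt | final/E_OsamocenaKoncovkaEroEryKratIsty.py | hledani_predku
-- ===== SOURCE A (Python) =====
-- def hledani_predku(predci, dite):
--     mozni = set()
--     for lex in predci:
--         if lex in dite and lex != dite:
--             mozni.add(lex)
--
--     konecny = set()
--     #tohle to míří na to, abych tam neměl sto a stodva zároveň
--     for i in mozni:
--         for j in mozni:
--             if i in j and i != j:
--                 konecny.add(i)
--
--     return mozni.difference(konecny)
-- ===== SOURCE B (Python) =====
-- def hledani_predku(predci, dite):
--     # phase 1: ordered dedup of the candidate substrings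
--     seen = set()
--     candidates = []
--     for lex in predci:
--         if lex in dite and lex != dite and lex not in seen:
--             seen.add(lex)
--             candidates.append(lex)
--     # phase 2: longest first; keep a word only if no kept word already contains it
--     maximal = []
--     for w in sorted(candidates, key=len, reverse=True):
--         if not any(w in r for r in maximal):
--             maximal.append(w)
--     kept = set(maximal)
--     return {w for w in candidates if w in kept}
-- ===== Notes on version B (the rewrite author's own statement) =====
-- stated objective: alternative
-- what changed: Phase two no longer builds the set of dominated words with an all-pairs double loop over the candidates; instead the candidates are sorted by length descending and greedily kept only if not contained in an already-kept maximal word, which is correct by transitivity of the substring relation.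
import Mathlib
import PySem

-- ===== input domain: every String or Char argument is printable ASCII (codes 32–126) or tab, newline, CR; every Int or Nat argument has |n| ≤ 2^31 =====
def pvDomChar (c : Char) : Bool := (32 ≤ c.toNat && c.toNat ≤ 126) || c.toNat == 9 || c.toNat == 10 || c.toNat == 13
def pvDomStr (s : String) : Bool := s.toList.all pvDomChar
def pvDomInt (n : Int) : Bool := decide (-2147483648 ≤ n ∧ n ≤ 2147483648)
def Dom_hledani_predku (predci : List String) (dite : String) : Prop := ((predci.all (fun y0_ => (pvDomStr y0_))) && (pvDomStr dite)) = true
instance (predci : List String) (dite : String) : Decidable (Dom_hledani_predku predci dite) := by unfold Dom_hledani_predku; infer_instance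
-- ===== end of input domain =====

-- B replaces A's all-pairs containment scan by: sort the candidates by length descending and
-- keep a word only if it is not contained in an already-kept (provably maximal) word (objective: alternative).

-- shared helper: the loop test 'lex in dite and lex != dite'
def jeVlastniPodretezec (dite lex : String) : Bool :=
  PySem.Str.isIn lex dite && !(lex == dite)

-- ===== PORT A =====
def hledani_predku (predci : List String) (dite : String) : List String :=
  let mozni : PySem.Set String :=
    predci.foldl (fun s lex => if jeVlastniPodretezec dite lex then PySem.Set.add s lex else s)
      PySem.Set.empty
  let konecny : PySem.Set String :=
    mozni.foldl (fun k i =>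
      mozni.foldl (fun k' j => if jeVlastniPodretezec j i then PySem.Set.add k' i else k') k)
      PySem.Set.empty
  PySem.Set.diff mozni konecny

-- ===== PORT B =====
def hledani_predku_alt (predci : List String) (dite : String) : List String :=
  let st :=
    predci.foldl (fun (st : PySem.Set String × List String) lex =>
      if jeVlastniPodretezec dite lex && !(PySem.Set.contains st.1 lex) then
        (PySem.Set.add st.1 lex, st.2 ++ [lex])
      else st)
      (PySem.Set.empty, [])
  let candidates := st.2
  let maximal :=
    (PySem.List.sorted candidates (fun w => PySem.Str.len w) true).foldl
      (fun m w => if m.any (fun r => PySem.Str.isIn w r) then m else m ++ [w]) []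
  let kept : PySem.Set String := PySem.Set.ofList maximal
  PySem.Set.ofList (candidates.filter (fun w => PySem.Set.contains kept w))

-- ===== PRECONDITION & SPEC =====
def Spec_hledani_predku (predci : List String) (dite : String) (out : List String) : Prop := out = hledani_predku_alt predci dite
instance (predci : List String) (dite : String) (out : List String) : Decidable (Spec_hledani_predku predci dite out) := by unfold Spec_hledani_predku; infer_instance

-- ===== CLAIM (what is proved, stated in full; the proofs are below) =====
def Claim_equal_hledani_predku : Prop := ∀ (predci : List String) (dite : String), Dom_hledani_predku predci dite → Spec_hledani_predku predci dite (hledani_predku predci dite)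

-- ===== LEMMAS AND PROOFS =====

-- x is strictly contained in some member of cand
def SDom (cand : List String) (x : String) : Prop :=
  ∃ j ∈ cand, PySem.Str.isIn x j = true ∧ x ≠ j

lemma isIn_refl (s : String) : PySem.Str.isIn s s = true :=
  (PySem.Str.isIn_iff_infix s s).mpr (List.infix_refl _)

lemma isIn_trans {a b c : String} (h1 : PySem.Str.isIn a b = true)
    (h2 : PySem.Str.isIn b c = true) : PySem.Str.isIn a c = true := by
  rw [PySem.Str.isIn_iff_infix] at *
  exact h1.trans h2

lemma isIn_len_lt {x j : String} (h : PySem.Str.isIn x j = true) (hne : x ≠ j) :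
    PySem.Str.len x < PySem.Str.len j := by
  rw [PySem.Str.isIn_iff_infix] at h
  have hle := h.length_le
  have hne' : x.toList.length ≠ j.toList.length := fun heq =>
    hne (String.toList_inj.mp (h.eq_of_length heq))
  simp only [PySem.Str.len_eq]
  omega

lemma jeVlastni_iff (dite lex : String) :
    jeVlastniPodretezec dite lex = true ↔ PySem.Str.isIn lex dite = true ∧ lex ≠ dite := by
  unfold jeVlastniPodretezec
  cases hI : PySem.Str.isIn lex dite
  · simp
  · simp

-- phase 1 of B runs A's phase-1 fold in both state components
lemma phase1_pair (p : String → Bool) (l : List String) (s : PySem.Set String) :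
    l.foldl (fun (st : PySem.Set String × List String) lex =>
        if p lex && !(PySem.Set.contains st.1 lex) then
          (PySem.Set.add st.1 lex, st.2 ++ [lex]) else st) (s, s)
      = (l.foldl (fun s lex => if p lex then PySem.Set.add s lex else s) s,
         l.foldl (fun s lex => if p lex then PySem.Set.add s lex else s) s) := by
  induction l generalizing s with
  | nil => rfl
  | cons x t ih =>
    simp only [List.foldl_cons]
    by_cases hp : p x = true
    · rw [if_pos hp]
      by_cases hc : PySem.Set.contains s x = true
      · have hcm : x ∈ s := (PySem.Set.contains_iff s x).mp hc
        have hadd : PySem.Set.add s x = s := by simp [PySem.Set.add, hcm]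
        rw [if_neg (show ¬ ((p x && !PySem.Set.contains (s, s).1 x) = true) by
          simp [hp, hcm]), hadd]
        exact ih s
      · have hcm : x ∉ s := fun hm => hc ((PySem.Set.contains_iff s x).mpr hm)
        have hadd : PySem.Set.add s x = s ++ [x] := by simp [PySem.Set.add, hcm]
        rw [if_pos (show (p x && !PySem.Set.contains (s, s).1 x) = true by
          simp [hp, hcm]), hadd]
        exact ih (s ++ [x])
    · rw [if_neg hp,
        if_neg (show ¬ ((p x && !PySem.Set.contains (s, s).1 x) = true) by simp [hp])]
      exact ih s

lemma nodup_phase1 (p : String → Bool) (l : List String) (s : PySem.Set String)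
    (h : s.Nodup) :
    (l.foldl (fun s lex => if p lex then PySem.Set.add s lex else s) s).Nodup := by
  induction l generalizing s with
  | nil => exact h
  | cons hd t ih =>
    simp only [List.foldl_cons]
    by_cases hp : p hd = true
    · rw [if_pos hp]; exact ih _ (PySem.Set.nodup_add s hd h)
    · rw [if_neg hp]; exact ih _ h

-- konecny's inner loop: conditionally add the fixed element v
lemma mem_inner (q : String → Bool) (v : String) (l : List String) (k : PySem.Set String)
    (x : String) :
    x ∈ l.foldl (fun k' j => if q j then PySem.Set.add k' v else k') k
      ↔ x ∈ k ∨ (x = v ∧ ∃ j ∈ l, q j = true) := by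
  induction l generalizing k with
  | nil => simp
  | cons hd t ih =>
    simp only [List.foldl_cons]
    by_cases hq : q hd = true
    · rw [if_pos hq, ih]
      simp only [PySem.Set.mem_add, List.mem_cons]
      constructor
      · rintro ((h | rfl) | ⟨rfl, j, hj, hqj⟩)
        · exact Or.inl h
        · exact Or.inr ⟨rfl, hd, Or.inl rfl, hq⟩
        · exact Or.inr ⟨rfl, j, Or.inr hj, hqj⟩
      · rintro (h | ⟨rfl, j, (rfl | hj), hqj⟩)
        · exact Or.inl (Or.inl h)
        · exact Or.inl (Or.inr rfl)
        · exact Or.inr ⟨rfl, j, hj, hqj⟩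
    · rw [if_neg hq, ih]
      simp only [List.mem_cons]
      constructor
      · rintro (h | ⟨rfl, j, hj, hqj⟩)
        · exact Or.inl h
        · exact Or.inr ⟨rfl, j, Or.inr hj, hqj⟩
      · rintro (h | ⟨rfl, j, (rfl | hj), hqj⟩)
        · exact Or.inl h
        · exact absurd hqj hq
        · exact Or.inr ⟨rfl, j, hj, hqj⟩

lemma mem_konecny (L2 L1 : List String) (k : PySem.Set String) (x : String) :
    x ∈ L1.foldl (fun k i =>
        L2.foldl (fun k' j => if jeVlastniPodretezec j i then PySem.Set.add k' i else k') k) k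
      ↔ x ∈ k ∨ (x ∈ L1 ∧ ∃ j ∈ L2, jeVlastniPodretezec j x = true) := by
  induction L1 generalizing k with
  | nil => simp
  | cons i t ih =>
    simp only [List.foldl_cons]
    rw [ih, mem_inner]
    simp only [List.mem_cons]
    constructor
    · rintro ((h | ⟨rfl, hj⟩) | ⟨ht, hj⟩)
      · exact Or.inl h
      · exact Or.inr ⟨Or.inl rfl, hj⟩
      · exact Or.inr ⟨Or.inr ht, hj⟩
    · rintro (h | ⟨(rfl | ht), hj⟩)
      · exact Or.inl (Or.inl h)
      · exact Or.inl (Or.inr ⟨rfl, hj⟩)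
      · exact Or.inr ⟨ht, hj⟩

-- greedy longest-first fold keeps exactly the non-dominated words
lemma fold_max_mem (cand : List String) :
    ∀ (L m : List String),
      (∀ y ∈ L, y ∈ cand) →
      L.Pairwise (fun a b => PySem.Str.len b ≤ PySem.Str.len a) →
      (∀ r ∈ m, r ∈ cand ∧ ¬ SDom cand r) →
      (∀ j ∈ cand, j ∉ L → ∃ r ∈ m, PySem.Str.isIn j r = true) →
      ∀ x, x ∈ L.foldl
          (fun m w => if m.any (fun r => PySem.Str.isIn w r) then m else m ++ [w]) m
        ↔ x ∈ m ∨ (x ∈ L ∧ ¬ SDom cand x) := by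
  intro L
  induction L with
  | nil => intro m _ _ _ _ x; simp
  | cons w t ih =>
    intro m hL hpair ha hb x
    simp only [List.foldl_cons]
    have hLw : w ∈ cand := hL w (List.mem_cons_self ..)
    have hpt := (List.pairwise_cons.mp hpair).2
    have hhd := (List.pairwise_cons.mp hpair).1
    by_cases hcov : m.any (fun r => PySem.Str.isIn w r) = true
    · rw [if_pos hcov]
      have hb' : ∀ j ∈ cand, j ∉ t → ∃ r ∈ m, PySem.Str.isIn j r = true := by
        intro j hj hjt
        by_cases hjw : j = w
        · subst hjw
          obtain ⟨r, hr, hir⟩ := List.any_eq_true.mp hcov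
          exact ⟨r, hr, hir⟩
        · exact hb j hj (by simp [hjt, hjw])
      rw [ih m (fun y hy => hL y (List.mem_cons_of_mem _ hy)) hpt ha hb']
      constructor
      · rintro (h | ⟨ht, hs⟩)
        · exact Or.inl h
        · exact Or.inr ⟨List.mem_cons_of_mem _ ht, hs⟩
      · rintro (h | ⟨hm, hs⟩)
        · exact Or.inl h
        · rcases List.mem_cons.mp hm with rfl | ht
          · -- x = w and x not dominated: the covering r must be x itself
            obtain ⟨r, hr, hir⟩ := List.any_eq_true.mp hcov
            by_cases hrx : r = x
            · exact Or.inl (hrx ▸ hr)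
            · exact absurd ⟨r, (ha r hr).1, hir, fun h => hrx h.symm⟩ hs
          · exact Or.inr ⟨ht, hs⟩
    · rw [if_neg hcov]
      have hw : ¬ SDom cand w := by
        rintro ⟨j, hj, hin, hne⟩
        have hlen := isIn_len_lt hin hne
        have hjt : j ∉ t := fun hjt => absurd (hhd j hjt) (by omega)
        have hjwt : j ∉ w :: t := by
          simp only [List.mem_cons, not_or]
          exact ⟨fun h => hne h.symm, hjt⟩
        obtain ⟨r, hr, hir⟩ := hb j hj hjwt
        exact absurd (List.any_eq_true.mpr ⟨r, hr, isIn_trans hin hir⟩) hcov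
      have ha' : ∀ r ∈ m ++ [w], r ∈ cand ∧ ¬ SDom cand r := by
        intro r hr
        rcases List.mem_append.mp hr with hr | hr
        · exact ha r hr
        · rw [List.mem_singleton.mp hr]; exact ⟨hLw, hw⟩
      have hb' : ∀ j ∈ cand, j ∉ t → ∃ r ∈ m ++ [w], PySem.Str.isIn j r = true := by
        intro j hj hjt
        by_cases hjw : j = w
        · subst hjw; exact ⟨j, by simp, isIn_refl j⟩
        · obtain ⟨r, hr, hir⟩ := hb j hj (by simp [hjt, hjw])
          exact ⟨r, List.mem_append.mpr (Or.inl hr), hir⟩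
      rw [ih (m ++ [w]) (fun y hy => hL y (List.mem_cons_of_mem _ hy)) hpt ha' hb']
      simp only [List.mem_append, List.mem_cons, List.not_mem_nil, or_false]
      constructor
      · rintro ((h | rfl) | ⟨ht, hs⟩)
        · exact Or.inl h
        · exact Or.inr ⟨Or.inl rfl, hw⟩
        · exact Or.inr ⟨Or.inr ht, hs⟩
      · rintro (h | ⟨(rfl | ht), hs⟩)
        · exact Or.inl (Or.inl h)
        · exact Or.inl (Or.inr rfl)
        · exact Or.inr ⟨ht, hs⟩

-- Set.ofList of a duplicate-free list is the list itself
lemma foldl_add_of_nodup (l : List String) :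
    ∀ s : PySem.Set String, l.Nodup → (∀ x ∈ l, x ∉ s) →
      l.foldl PySem.Set.add s = s ++ l := by
  induction l with
  | nil => intro s _ _; simp
  | cons hd t ih =>
    intro s hnd hdisj
    have hcm : hd ∉ s := hdisj hd (List.mem_cons_self ..)
    have hadd : PySem.Set.add s hd = s ++ [hd] := by simp [PySem.Set.add, hcm]
    simp only [List.foldl_cons, hadd]
    rw [ih (s ++ [hd]) (List.nodup_cons.mp hnd).2]
    · simp
    · intro x hx
      simp only [List.mem_append, List.mem_singleton, not_or]
      exact ⟨hdisj x (List.mem_cons_of_mem _ hx),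
        fun h => absurd (h ▸ hx) (List.nodup_cons.mp hnd).1⟩

lemma ofList_of_nodup (l : List String) (h : l.Nodup) : PySem.Set.ofList l = l := by
  have := foldl_add_of_nodup l PySem.Set.empty h (by intro x _; simp [PySem.Set.empty])
  simpa [PySem.Set.ofList, PySem.Set.empty] using this

-- ===== VERDICT (by name: the statement is the Claim_ definition above) =====
theorem hledani_predku_spec : Claim_equal_hledani_predku := by
  intro predci dite _
  unfold Spec_hledani_predku hledani_predku hledani_predku_alt
  -- name the phase-1 fold result
  set mozni : PySem.Set String :=
    predci.foldl (fun s lex => if jeVlastniPodretezec dite lex then PySem.Set.add s lex else s)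
      PySem.Set.empty with hmozni
  -- B's paired phase-1 fold computes (mozni, mozni)
  rw [show (PySem.Set.empty, ([] : List String))
        = ((PySem.Set.empty : PySem.Set String), (PySem.Set.empty : PySem.Set String)) from rfl,
      phase1_pair (fun lex => jeVlastniPodretezec dite lex) predci PySem.Set.empty]
  simp only [← hmozni]
  have hnodup : mozni.Nodup := by
    rw [hmozni]; exact nodup_phase1 _ predci _ (List.nodup_nil)
  -- membership characterisations
  have hkon : ∀ x, (mozni.foldl (fun k i =>
      mozni.foldl (fun k' j => if jeVlastniPodretezec j i then PySem.Set.add k' i else k') k)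
        PySem.Set.empty).contains x = true ↔ x ∈ mozni ∧ SDom mozni x := by
    intro x
    rw [PySem.Set.contains_iff, mem_konecny]
    simp only [PySem.Set.empty, List.not_mem_nil, false_or]
    constructor
    · rintro ⟨hx, j, hj, hq⟩
      obtain ⟨hin, hne⟩ := (jeVlastni_iff j x).mp hq
      exact ⟨hx, j, hj, hin, hne⟩
    · rintro ⟨hx, j, hj, hin, hne⟩
      exact ⟨hx, j, hj, (jeVlastni_iff j x).mpr ⟨hin, hne⟩⟩
  have hmax : ∀ x, x ∈ ((PySem.List.sorted mozni (fun w => PySem.Str.len w) true).foldl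
      (fun m w => if m.any (fun r => PySem.Str.isIn w r) then m else m ++ [w]) [])
        ↔ x ∈ mozni ∧ ¬ SDom mozni x := by
    intro x
    rw [fold_max_mem mozni (PySem.List.sorted mozni (fun w => PySem.Str.len w) true) []
      (fun y hy => (PySem.List.mem_sorted ..).mp hy)
      (PySem.List.sorted_pairwise_rev mozni (fun w => PySem.Str.len w))
      (by intro r hr; simp at hr)
      (by intro j hj hjL; exact absurd ((PySem.List.mem_sorted ..).mpr hj) hjL)]
    simp only [List.not_mem_nil, false_or]
    rw [PySem.List.mem_sorted]
  -- both sides are mozni filtered by "not strictly dominated"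
  rw [ofList_of_nodup _ (List.Nodup.filter _ hnodup)]
  unfold PySem.Set.diff
  apply List.filter_congr
  intro x hx
  by_cases hs : SDom mozni x
  · have hk := (hkon x).mpr ⟨hx, hs⟩
    have hm : (PySem.Set.ofList
        ((PySem.List.sorted mozni (fun w => PySem.Str.len w) true).foldl
          (fun m w => if m.any (fun r => PySem.Str.isIn w r) then m else m ++ [w]) [])).contains
            x = false := by
      rw [← Bool.not_eq_true, PySem.Set.contains_iff, PySem.Set.mem_ofList]
      intro hmem
      exact ((hmax x).mp hmem).2 hs
    rw [hm, hk]
    rfl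
  · have hk : (mozni.foldl (fun k i =>
        mozni.foldl (fun k' j => if jeVlastniPodretezec j i then PySem.Set.add k' i else k') k)
          PySem.Set.empty).contains x = false := by
      rw [← Bool.not_eq_true, hkon x]
      exact fun h => hs h.2
    have hm : (PySem.Set.ofList
        ((PySem.List.sorted mozni (fun w => PySem.Str.len w) true).foldl
          (fun m w => if m.any (fun r => PySem.Str.isIn w r) then m else m ++ [w]) [])).contains
            x = true := by
      rw [PySem.Set.contains_iff, PySem.Set.mem_ofList]
      exact (hmax x).mpr ⟨hx, hs⟩
    rw [hm, hk]
    rfl
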